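-- pv_equiv track=rewrite | github.com/shadowezz/A-December-of-Algorithms-2019 | December-01/solution.py | sevenish_number
-- ===== SOURCE A (Python) =====
-- def sevenish_number(num):
--     binary = bin(num)[2:]
--     result = 0
--     power = 0
--     for digit in reversed(binary):
--         result += int(digit) * 7**power
--         power += 1
--     return result
-- ===== SOURCE B (Python) =====
-- def sevenish_number(num):
--     result = 0
--     for digit in bin(num)[2:]:
--         result = result * 7 + int(digit)
--     return result
-- ===== Notes on version B (the rewrite author's own statement) =====
-- stated objective: simpler
-- what changed: Horner's method over the binary digits left-to-right with a single accumulator (result = result*base + digit), replacing A's reversed traversal with a power counter and explicit exponentiation.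
import Mathlib
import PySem

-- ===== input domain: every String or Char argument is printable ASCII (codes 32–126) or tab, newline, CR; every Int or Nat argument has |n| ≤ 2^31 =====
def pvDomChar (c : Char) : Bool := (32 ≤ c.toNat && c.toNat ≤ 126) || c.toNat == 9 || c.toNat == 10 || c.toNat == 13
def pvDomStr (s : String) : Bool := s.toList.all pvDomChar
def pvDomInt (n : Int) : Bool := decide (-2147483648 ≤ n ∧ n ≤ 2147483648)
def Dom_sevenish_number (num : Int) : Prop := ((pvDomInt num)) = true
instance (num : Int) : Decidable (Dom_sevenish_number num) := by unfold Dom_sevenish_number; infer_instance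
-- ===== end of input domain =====

-- B replaces A's reversed loop with power counter and 7**power by a left-to-right
-- Horner accumulation (result = result*7 + digit); objective: simpler.

-- ===== PORT A =====
-- shared model of `bin(num)[2:]` as the list of binary digit values, MSB first
-- (exact for num ≥ 0, the precondition; for negative num Python raises ValueError
-- while parsing the 'b' of '-0b…', excluded by Pre_).
def pyBinDigits (n : Nat) : List Int :=
  if n = 0 then [] else pyBinDigits (n / 2) ++ [(n % 2 : Int)]

def binOf (num : Int) : List Int :=
  if num.toNat = 0 then [0] else pyBinDigits num.toNat

-- A: result += int(digit) * 7**power; power += 1, over reversed(binary)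
def sevenish_number (num : Int) : Int :=
  (((binOf num).reverse).foldl
    (fun (s : Int × Nat) d => (s.1 + d * 7 ^ s.2, s.2 + 1)) ((0 : Int), (0 : Nat))).1

-- ===== PORT B =====
-- B: result = result * 7 + int(digit), over binary left-to-right
def sevenish_number_alt (num : Int) : Int :=
  (binOf num).foldl (fun r d => r * 7 + d) 0

-- ===== PRECONDITION & SPEC =====
-- Pre_ excludes negative num, on which Python A (and B) raise ValueError.
def Pre_sevenish_number (num : Int) : Prop := 0 ≤ num
instance (num : Int) : Decidable (Pre_sevenish_number num) := by unfold Pre_sevenish_number; infer_instance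
def pvWitness_sevenish_number : Int := (5)

def Spec_sevenish_number (num : Int) (out : Int) : Prop := out = sevenish_number_alt num
instance (num : Int) (out : Int) : Decidable (Spec_sevenish_number num out) := by unfold Spec_sevenish_number; infer_instance

-- ===== CLAIM (what is proved, stated in full; the proofs are below) =====
def Claim_equal_sevenish_number : Prop := ∀ (num : Int), Dom_sevenish_number num → Pre_sevenish_number num → Spec_sevenish_number num (sevenish_number num)

-- ===== LEMMAS AND PROOFS =====

-- Horner with a nonzero accumulator decomposes linearly.
theorem horner_shift (t : List Int) (a : Int) :
    t.foldl (fun r d => r * 7 + d) a = a * 7 ^ t.length + t.foldl (fun r d => r * 7 + d) 0 := by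
  induction t generalizing a with
  | nil => simp
  | cons d t ih =>
    simp only [List.foldl_cons, List.length_cons]
    rw [ih (a * 7 + d), ih (0 * 7 + d)]
    ring

-- A's reversed power-sum fold equals B's Horner fold, with state generalized.
theorem powfold_eq_horner (l : List Int) (r : Int) (p : Nat) :
    (l.reverse.foldl (fun (s : Int × Nat) d => (s.1 + d * 7 ^ s.2, s.2 + 1)) (r, p)).1
      = (l.foldl (fun r d => r * 7 + d) 0) * 7 ^ p + r := by
  induction l generalizing r p with
  | nil => simp
  | cons d t ih =>
    simp only [List.reverse_cons, List.foldl_append, List.foldl_cons, List.foldl_nil]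
    have h2 : (t.reverse.foldl (fun (s : Int × Nat) d => (s.1 + d * 7 ^ s.2, s.2 + 1)) (r, p)).2
        = p + t.length := by
      clear ih
      induction t generalizing r p with
      | nil => simp
      | cons e u ihu =>
        simp only [List.reverse_cons, List.foldl_append, List.foldl_cons, List.foldl_nil,
          List.length_cons]
        rw [ihu]
        omega
    rw [ih, h2, horner_shift t (0 * 7 + d)]
    ring

-- ===== VERDICT (by name: the statement is the Claim_ definition above) =====
theorem sevenish_number_spec : Claim_equal_sevenish_number := by
  intro num _ _
  unfold Spec_sevenish_number sevenish_number sevenish_number_alt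
  rw [powfold_eq_horner]
  simp
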